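-- pv_equiv track=rewrite | github.com/lewisjwilson/ProjectEuler | problem026.py | recurring_part
-- ===== SOURCE A (Python) =====
-- def recurring_part(num, den):
--     output = ""
--
--     # A map to check for already seen values
--     seen = {}
--
--     # First remainder
--     rem = num % den
--
--     while (rem != 0) and (rem not in seen):
--         # Store the remainder
--         seen[rem] = len(output)
--
--         # Multiply the remainder by 10
--         rem *= 10
--
--         # Append the remainder/denominator to the output
--         output += str(rem//den)
--
--         # Update the remainder
--         rem = rem % den
--
--     if(rem == 0):
--         return "0"
--     else:
--         return output[seen[rem]:]
-- ===== SOURCE B (Python) =====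
-- def recurring_part(num, den):
--     # Pass 1: walk the remainder recurrence keeping only a set, to find
--     # the cycle-entry remainder (or detect termination).
--     seen = set()
--     rem = num % den
--     while rem != 0 and rem not in seen:
--         seen.add(rem)
--         rem = rem * 10 % den
--     if rem == 0:
--         return "0"
--     # Pass 2: emit digits starting from the cycle-entry remainder until
--     # the remainder returns to it.
--     start = rem
--     parts = []
--     while True:
--         parts.append(str(rem * 10 // den))
--         rem = rem * 10 % den
--         if rem == start:
--             break
--     return "".join(parts)
-- ===== Notes on version B (the rewrite author's own statement) =====
-- stated objective: simpler
-- what changed: Replaces A's single loop with a position-indexed dict and a final string slice by two passes: a set-based walk of the remainder recurrence that finds the cycle-entry remainder, then a second loop that emits only the recurring digit block until the remainder returns to it.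
import Mathlib
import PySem

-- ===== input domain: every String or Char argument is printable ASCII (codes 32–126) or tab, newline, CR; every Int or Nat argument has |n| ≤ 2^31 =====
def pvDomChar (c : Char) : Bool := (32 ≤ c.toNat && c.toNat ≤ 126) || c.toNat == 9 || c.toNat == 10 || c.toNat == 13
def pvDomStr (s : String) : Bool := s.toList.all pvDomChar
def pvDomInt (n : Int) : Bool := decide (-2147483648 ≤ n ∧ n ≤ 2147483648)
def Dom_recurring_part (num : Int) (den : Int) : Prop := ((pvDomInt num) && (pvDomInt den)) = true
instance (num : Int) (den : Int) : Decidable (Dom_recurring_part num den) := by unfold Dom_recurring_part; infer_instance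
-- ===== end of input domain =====

-- B replaces A's position-indexed dict and final slice by two set-based passes: find the
-- cycle-entry remainder first, then emit just the recurring block (objective: simpler).

-- ===== PORT A =====
-- A's while loop as fuel recursion over the same state (output, seen, rem); the fuel
-- den.natAbs + 1 exceeds the number of distinct remainders, so it is never exhausted
-- when den ≠ 0 (Pre_). Python str is carried as List Char, String.ofList at return (exact).
def recurring_part_loopA (den : Int) : Nat → List Char → PySem.Dict Int Int → Int → String
  | 0, _, _, _ => ""
  | f + 1, out, seen, rem =>
    if rem ≠ 0 ∧ PySem.Dict.get? seen rem = none then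
      let seen' := PySem.Dict.insert seen rem (out.length : Int)
      let rem2 := rem * 10
      let out' := out ++ PySem.Int.toChars (PySem.Int.floordiv rem2 den)
      recurring_part_loopA den f out' seen' (PySem.Int.mod rem2 den)
    else
      if rem = 0 then "0"
      else String.ofList (PySem.List.slice out (some ((PySem.Dict.get? seen rem).getD 0)) none)

def recurring_part (num : Int) (den : Int) : String :=
  recurring_part_loopA den (den.natAbs + 1) [] PySem.Dict.empty (PySem.Int.mod num den)

-- ===== PORT B =====
-- Source B's second loop ('while True: … if rem == start: break'); fuel bounds the depth only.
def recurring_part_pass2 (den start : Int) : Nat → Int → List Char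
  | 0, _ => []
  | f + 1, rem =>
    let d := PySem.Int.toChars (PySem.Int.floordiv (rem * 10) den)
    let rem' := PySem.Int.mod (rem * 10) den
    if rem' = start then d else d ++ recurring_part_pass2 den start f rem'

-- Source B's first loop: only a set of remainders is kept.
def recurring_part_pass1 (den : Int) (F : Nat) : Nat → PySem.Set Int → Int → String
  | 0, _, _ => ""
  | f + 1, s, rem =>
    if rem ≠ 0 ∧ ¬ PySem.Set.contains s rem then
      recurring_part_pass1 den F f (PySem.Set.add s rem) (PySem.Int.mod (rem * 10) den)
    else
      if rem = 0 then "0"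
      else String.ofList (recurring_part_pass2 den rem F rem)

def recurring_part_alt (num : Int) (den : Int) : String :=
  recurring_part_pass1 den (den.natAbs + 1) (den.natAbs + 1) PySem.Set.empty (PySem.Int.mod num den)

-- ===== PRECONDITION & SPEC =====
-- Python raises ZeroDivisionError at den = 0 (both A and B); that is all Pre_ excludes.
def Pre_recurring_part (num : Int) (den : Int) : Prop := den ≠ 0
instance (num : Int) (den : Int) : Decidable (Pre_recurring_part num den) := by unfold Pre_recurring_part; infer_instance
def pvWitness_recurring_part : Int × Int := (1, 7)

def Spec_recurring_part (num : Int) (den : Int) (out : String) : Prop := out = recurring_part_alt num den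
instance (num : Int) (den : Int) (out : String) : Decidable (Spec_recurring_part num den out) := by unfold Spec_recurring_part; infer_instance

-- ===== CLAIM (what is proved, stated in full; the proofs are below) =====
def Claim_equal_recurring_part : Prop := ∀ (num : Int) (den : Int), Dom_recurring_part num den → Pre_recurring_part num den → Spec_recurring_part num den (recurring_part num den)

-- ===== LEMMAS AND PROOFS =====

-- digits emitted by k steps of the remainder recurrence from r, and the remainder after k steps
def pvEmit (den : Int) : Nat → Int → List Char
  | 0, _ => []
  | k + 1, r => PySem.Int.toChars (PySem.Int.floordiv (r * 10) den) ++ pvEmit den k (PySem.Int.mod (r * 10) den)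

def pvIter (den : Int) : Nat → Int → Int
  | 0, r => r
  | k + 1, r => pvIter den k (PySem.Int.mod (r * 10) den)

theorem pvIter_succ_right (den : Int) (k : Nat) (r : Int) :
    pvIter den (k + 1) r = PySem.Int.mod (pvIter den k r * 10) den := by
  induction k generalizing r with
  | zero => rfl
  | succ k ih => simpa [pvIter] using ih (PySem.Int.mod (r * 10) den)

theorem pvEmit_succ_right (den : Int) (k : Nat) (r : Int) :
    pvEmit den (k + 1) r = pvEmit den k r ++ PySem.Int.toChars (PySem.Int.floordiv (pvIter den k r * 10) den) := by
  induction k generalizing r with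
  | zero => simp [pvEmit, pvIter]
  | succ k ih =>
    calc pvEmit den (k + 1 + 1) r
        = PySem.Int.toChars (PySem.Int.floordiv (r * 10) den) ++ pvEmit den (k + 1) (PySem.Int.mod (r * 10) den) := rfl
      _ = PySem.Int.toChars (PySem.Int.floordiv (r * 10) den) ++
            (pvEmit den k (PySem.Int.mod (r * 10) den) ++
              PySem.Int.toChars (PySem.Int.floordiv (pvIter den k (PySem.Int.mod (r * 10) den) * 10) den)) := by
          rw [ih]
      _ = pvEmit den (k + 1) r ++ PySem.Int.toChars (PySem.Int.floordiv (pvIter den (k + 1) r * 10) den) := by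
          simp [pvEmit, pvIter]

theorem pass2_eq_pvEmit (den start : Int) :
    ∀ (k f : Nat) (r : Int), 1 ≤ k → k ≤ f →
      pvIter den k r = start →
      (∀ t, 0 < t → t < k → pvIter den t r ≠ start) →
      recurring_part_pass2 den start f r = pvEmit den k r := by
  intro k
  induction k with
  | zero => intro f r h; omega
  | succ k ih =>
    intro f r _ hkf hiter hno
    obtain ⟨f', rfl⟩ : ∃ f', f = f' + 1 := ⟨f - 1, by omega⟩
    by_cases hk0 : k = 0
    · subst hk0
      simp only [pvIter] at hiter
      simp [recurring_part_pass2, hiter, pvEmit]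
    · have hne : PySem.Int.mod (r * 10) den ≠ start := by
        have := hno 1 (by omega) (by omega)
        simpa [pvIter] using this
      have hrec := ih f' (PySem.Int.mod (r * 10) den) (by omega) (by omega)
        (by simpa [pvIter] using hiter)
        (by
          intro t ht htk
          have := hno (t + 1) (by omega) (by omega)
          simpa [pvIter] using this)
      simp [recurring_part_pass2, hne, pvEmit, hrec]

theorem pvContains_add (s : PySem.Set Int) (x y : Int) :
    PySem.Set.contains (PySem.Set.add s x) y = (PySem.Set.contains s y || decide (y = x)) := by
  rw [Bool.eq_iff_iff]
  simp only [PySem.Set.contains_iff, Bool.or_eq_true, decide_eq_true_eq, PySem.Set.mem_add]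

-- Invariant relating A's dict entries to the emission sequence: each stored remainder r ↦ i
-- reaches the current rem in some k ≥ 1 steps emitting exactly out.drop i, never passing
-- through r again strictly before step k, and k fits the remaining pass-2 fuel budget F.
def pvInv (den : Int) (F f : Nat) (out : List Char) (seen : PySem.Dict Int Int) (rem : Int) : Prop :=
  ∀ r i, PySem.Dict.get? seen r = some i →
    ∃ k : Nat, 1 ≤ k ∧ k + f ≤ F ∧ 0 ≤ i ∧ i.toNat ≤ out.length ∧
      pvEmit den k r = out.drop i.toNat ∧ pvIter den k r = rem ∧
      (∀ t, 0 < t → t < k → pvIter den t r ≠ r)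

theorem loopA_eq_pass1 (den : Int) (F : Nat) :
    ∀ (f : Nat) (out : List Char) (seen : PySem.Dict Int Int) (s : PySem.Set Int) (rem : Int),
      f ≤ F →
      (∀ r : Int, (PySem.Dict.get? seen r).isSome = PySem.Set.contains s r) →
      pvInv den F f out seen rem →
      recurring_part_loopA den f out seen rem = recurring_part_pass1 den F f s rem := by
  intro f
  induction f with
  | zero => intro out seen s rem _ _ _; rfl
  | succ f ih =>
    intro out seen s rem hfF hmem hinv
    by_cases h0 : rem = 0
    · simp [recurring_part_loopA, recurring_part_pass1, h0]
    · by_cases hin : PySem.Dict.get? seen rem = none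
      · -- both loops take another iteration
        have hs : PySem.Set.contains s rem = false := by
          have := hmem rem
          rw [hin] at this
          exact this.symm
        have hns : ¬ PySem.Set.contains s rem = true := by rw [hs]; simp
        rw [recurring_part_loopA, recurring_part_pass1,
          if_pos ⟨h0, hin⟩, if_pos ⟨h0, hns⟩]
        apply ih
        · omega
        · intro r
          rw [pvContains_add, PySem.Dict.get?_insert]
          by_cases hr : r = rem
          · simp [hr]
          · simp [hr, hmem r]
        · -- invariant preservation
          intro r i hget
          rw [PySem.Dict.get?_insert] at hget
          by_cases hr : r = rem
          · rw [if_pos hr] at hget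
            have hi : (out.length : Int) = i := by simpa using hget
            subst hr
            refine ⟨1, le_refl _, by omega, by omega, ?_, ?_, by simp [pvIter], ?_⟩
            · simp [← hi]
            · simp [← hi, pvEmit]
            · intro t ht htk; omega
          · rw [if_neg hr] at hget
            obtain ⟨k, hk1, hkF, hi0, hilen, hemit, hiter, hno⟩ := hinv r i hget
            refine ⟨k + 1, by omega, by omega, hi0, ?_, ?_, ?_, ?_⟩
            · simp only [List.length_append]; omega
            · rw [pvEmit_succ_right, hemit, hiter, List.drop_append_of_le_length hilen]
            · rw [pvIter_succ_right, hiter]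
            · intro t ht htk
              rcases Nat.lt_or_ge t k with h | h
              · exact hno t ht h
              · have : t = k := by omega
                subst this
                rw [hiter]
                intro heq
                rw [heq, hget] at hin
                exact Option.some_ne_none i hin
      · -- loops exit on a repeated remainder; A slices, B runs pass 2
        obtain ⟨i, hget⟩ := Option.ne_none_iff_exists'.mp hin
        have hs : PySem.Set.contains s rem = true := by
          have := hmem rem
          rw [hget] at this
          exact this.symm
        rw [recurring_part_loopA, recurring_part_pass1]
        simp only [if_neg (fun (h : rem ≠ 0 ∧ PySem.Dict.get? seen rem = none) => hin h.2),
          if_neg (fun (h : rem ≠ 0 ∧ ¬PySem.Set.contains s rem = true) => h.2 hs),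
          if_neg h0]
        obtain ⟨k, hk1, hkF, hi0, hilen, hemit, hiter, hno⟩ := hinv rem i hget
        have h2 := pass2_eq_pvEmit den rem k F rem hk1 (by omega) hiter hno
        rw [hget, h2, hemit]
        congr 1
        simp only [Option.getD_some]
        rw [PySem.List.slice_from _ hi0]

-- ===== VERDICT (by name: the statement is the Claim_ definition above) =====
theorem recurring_part_spec : Claim_equal_recurring_part := by
  intro num den _ _
  unfold Spec_recurring_part recurring_part recurring_part_alt
  apply loopA_eq_pass1
  · exact le_refl _
  · intro r
    simp [PySem.Dict.get?_empty, PySem.Set.empty, PySem.Set.contains]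
  · intro r i hget
    rw [PySem.Dict.get?_empty] at hget
    exact Option.some_ne_none i hget.symm |>.elim
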